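-- pv_equiv track=rewrite | github.com/saldinat/Encryption-Decryption-project- | cipher_functions.py | is_valid_deck
-- ===== SOURCE A (Python) =====
-- def is_valid_deck(deck):
--     """ (list of int) -> bool
--
--     The function checks and returns True if the given deck is valid (i.e.
--     contains every integer from 1 up to the number of cards in the deck).
--
--     >>> is_valid_deck([7, 4, 6, 3, 5, 1, 2])
--     True
--     >>> is_valid_deck([1, 4, 3])
--     False
--     """
--
--     flag = True
--     test_deck = []
--     for i in range(1, len(deck) + 1):
--         test_deck.append(i)
--     for value in deck:
--         if value not in test_deck:
--             flag = False
--     return flag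
-- ===== SOURCE B (Python) =====
-- def is_valid_deck(deck):
--     # Reduce to extremes: every value lies in 1..len(deck) iff min >= 1 and max <= len(deck).
--     if not deck:
--         return True
--     lo = hi = deck[0]
--     for v in deck[1:]:
--         if v < lo:
--             lo = v
--         if v > hi:
--             hi = v
--     return lo >= 1 and hi <= len(deck)
-- ===== Notes on version B (the rewrite author's own statement) =====
-- stated objective: simpler
-- what changed: Replaces the built test-deck list and the per-element membership scan by a single pass tracking the running minimum and maximum, then one bound check lo >= 1 and hi <= len(deck).
import Mathlib
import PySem

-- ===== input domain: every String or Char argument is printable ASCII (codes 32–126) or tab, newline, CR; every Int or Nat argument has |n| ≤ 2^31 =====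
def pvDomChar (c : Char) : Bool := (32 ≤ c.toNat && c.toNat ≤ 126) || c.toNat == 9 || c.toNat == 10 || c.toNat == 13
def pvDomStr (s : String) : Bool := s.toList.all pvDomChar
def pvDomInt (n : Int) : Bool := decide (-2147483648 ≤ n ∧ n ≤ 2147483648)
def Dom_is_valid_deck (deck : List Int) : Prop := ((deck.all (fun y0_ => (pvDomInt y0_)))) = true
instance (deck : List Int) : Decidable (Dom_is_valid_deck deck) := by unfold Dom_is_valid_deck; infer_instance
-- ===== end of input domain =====

-- B replaces A's built range-list and per-element membership scan by one pass
-- tracking the running min/max and a final bound check (objective: simpler).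

-- ===== PORT A =====
def is_valid_deck (deck : List Int) : Bool :=
  let test_deck := PySem.List.pyRange 1 ((deck.length : Int) + 1) 1
  deck.foldl (fun flag value => if ¬ (value ∈ test_deck) then false else flag) true

-- ===== PORT B =====
def is_valid_deck_alt (deck : List Int) : Bool :=
  match deck with
  | [] => true
  | x :: xs =>
    let p := xs.foldl
      (fun (p : Int × Int) v =>
        (if v < p.1 then v else p.1, if v > p.2 then v else p.2)) (x, x)
    decide (1 ≤ p.1) && decide (p.2 ≤ (deck.length : Int))

-- ===== PRECONDITION & SPEC =====
def Spec_is_valid_deck (deck : List Int) (out : Bool) : Prop := out = is_valid_deck_alt deck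
instance (deck : List Int) (out : Bool) : Decidable (Spec_is_valid_deck deck out) := by unfold Spec_is_valid_deck; infer_instance

-- ===== CLAIM (what is proved, stated in full; the proofs are below) =====
def Claim_equal_is_valid_deck : Prop := ∀ (deck : List Int), Dom_is_valid_deck deck → Spec_is_valid_deck deck (is_valid_deck deck)

-- ===== LEMMAS AND PROOFS =====

-- A's membership fold is the conjunction of per-element membership tests.
theorem foldA_eq_all (test_deck : List Int) :
    ∀ (deck : List Int) (flag : Bool),
      deck.foldl (fun flag value => if ¬ (value ∈ test_deck) then false else flag) flag
        = (flag && deck.all (fun v => decide (v ∈ test_deck))) := by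
  intro deck
  induction deck with
  | nil => intro flag; simp
  | cons x xs ih =>
    intro flag
    simp only [List.foldl_cons, List.all_cons, ih]
    by_cases h : x ∈ test_deck <;> simp [h]

-- B's pair fold computes the running minimum and maximum.
theorem foldB_min_max :
    ∀ (xs : List Int) (a b : Int),
      xs.foldl (fun (p : Int × Int) v =>
          (if v < p.1 then v else p.1, if v > p.2 then v else p.2)) (a, b)
        = (xs.foldl min a, xs.foldl max b) := by
  intro xs
  induction xs with
  | nil => intro a b; rfl
  | cons x xs ih =>
    intro a b
    simp only [List.foldl_cons, ih]
    have h1 : (if x < a then x else a) = min a x := by split <;> omega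
    have h2 : (if x > b then x else b) = max b x := by split <;> omega
    rw [h1, h2]

theorem foldl_min_le (c : Int) :
    ∀ (xs : List Int) (a : Int),
      (c ≤ xs.foldl min a) ↔ (c ≤ a ∧ ∀ v ∈ xs, c ≤ v) := by
  intro xs
  induction xs with
  | nil => intro a; simp
  | cons x xs ih =>
    intro a
    simp only [List.foldl_cons, ih, List.mem_cons]
    constructor
    · rintro ⟨h1, h2⟩
      rcases le_min_iff.mp h1 with ⟨ha, hx⟩
      exact ⟨ha, fun v hv => hv.elim (fun e => e ▸ hx) (h2 v)⟩
    · rintro ⟨ha, h⟩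
      exact ⟨le_min_iff.mpr ⟨ha, h x (Or.inl rfl)⟩, fun v hv => h v (Or.inr hv)⟩

theorem foldl_max_le (c : Int) :
    ∀ (xs : List Int) (a : Int),
      (xs.foldl max a ≤ c) ↔ (a ≤ c ∧ ∀ v ∈ xs, v ≤ c) := by
  intro xs
  induction xs with
  | nil => intro a; simp
  | cons x xs ih =>
    intro a
    simp only [List.foldl_cons, ih, List.mem_cons]
    constructor
    · rintro ⟨h1, h2⟩
      rcases max_le_iff.mp h1 with ⟨ha, hx⟩
      exact ⟨ha, fun v hv => hv.elim (fun e => e ▸ hx) (h2 v)⟩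
    · rintro ⟨ha, h⟩
      exact ⟨max_le_iff.mpr ⟨ha, h x (Or.inl rfl)⟩, fun v hv => h v (Or.inr hv)⟩

-- ===== VERDICT (by name: the statement is the Claim_ definition above) =====
theorem is_valid_deck_spec : Claim_equal_is_valid_deck := by
  unfold Claim_equal_is_valid_deck
  intro deck _
  unfold Spec_is_valid_deck is_valid_deck is_valid_deck_alt
  rw [foldA_eq_all]
  cases deck with
  | nil => simp
  | cons x xs =>
    simp only [foldB_min_max]
    rw [Bool.eq_iff_iff]
    simp only [Bool.true_and, Bool.and_eq_true, decide_eq_true_eq,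
      List.all_eq_true, List.mem_cons]
    rw [foldl_min_le, foldl_max_le]
    constructor
    · intro h
      have hx := h x (Or.inl rfl)
      rw [PySem.List.mem_pyRange_one] at hx
      refine ⟨⟨hx.1, fun v hv => ?_⟩, ⟨by omega, fun v hv => ?_⟩⟩ <;>
        · have := h v (Or.inr hv); rw [PySem.List.mem_pyRange_one] at this; omega
    · rintro ⟨⟨h1x, h1⟩, ⟨h2x, h2⟩⟩ v hv
      rw [PySem.List.mem_pyRange_one]
      rcases hv with rfl | hv
      · omega
      · have := h1 v hv; have := h2 v hv; omega
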